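-- pv_equiv track=rewrite | github.com/dstapel/Dieter---ETL---MonarchMoney | MonarchMoneyMain-v3.py | _account_headers_rows
-- ===== SOURCE A (Python) =====
-- def _account_headers_rows(records: list[dict]):
--     """
--     Generate headers and rows for accounts with AccountType in column 2.
--     """
--     if not records:
--         return [], []
--
--     # Get all unique keys from records
--     all_keys = {k for r in records for k in r.keys()}
--
--     # Start with AccountType in position 2, then add remaining columns
--     headers = []
--
--     # Add columns in specific order for accounts
--     priority_columns = ["id", "TypeDisplay", "AccountType", "displayName", "InstitutionName", "currentBalance", "displayBalance"]  # InstitutionName after displayName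
--
--     for col in priority_columns:
--         if col in all_keys:
--             headers.append(col)
--             all_keys.discard(col)
--
--     # Add remaining columns with custom sort to put type before subtype
--     remaining_keys = sorted(all_keys)
--
--     # Handle type/subtype ordering - put type before subtype
--     if "type" in remaining_keys and "subtype" in remaining_keys:
--         remaining_keys.remove("type")
--         remaining_keys.remove("subtype")
--         # Re-sort without type/subtype, then add them in correct order
--         other_keys = sorted([k for k in remaining_keys])
--         # Find where to insert type/subtype alphabetically
--         insert_pos = 0
--         for i, key in enumerate(other_keys):
--             if key > "type":
--                 insert_pos = i
--                 break
--         else: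
--             insert_pos = len(other_keys)
--
--         # Insert type and subtype in that order
--         other_keys.insert(insert_pos, "type")
--         other_keys.insert(insert_pos + 1, "subtype")
--         headers.extend(other_keys)
--     else:
--         headers.extend(remaining_keys)
--
--     # Sort records by TypeDisplay, AccountType, then displayName
--     records_sorted = sorted(records, key=lambda x: (
--         x.get('TypeDisplay', ''),
--         x.get('AccountType', ''),
--         x.get('displayName', '')
--     ))
--
--     rows = [[r.get(h, "") for h in headers] for r in records_sorted]
--     return headers, rows
-- ===== SOURCE B (Python) =====
-- def _account_headers_rows(records: list[dict]):
--     """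
--     Generate headers and rows for accounts with AccountType in column 2.
--     """
--     priority_columns = ["id", "TypeDisplay", "AccountType", "displayName", "InstitutionName", "currentBalance", "displayBalance"]
--     all_keys = {k for r in records for k in r.keys()}
--
--     headers = [c for c in priority_columns if c in all_keys]
--     rest = all_keys.difference(priority_columns)
--
--     if "type" in rest and "subtype" in rest:
--         # composite key: subtype sorts as ("type", 1), i.e. immediately after "type"
--         headers += sorted(rest, key=lambda k: ("type", 1) if k == "subtype" else (k, 0))
--     else:
--         headers += sorted(rest)
--
--     records_sorted = sorted(records, key=lambda x: (
--         x.get('TypeDisplay', ''),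
--         x.get('AccountType', ''),
--         x.get('displayName', '')
--     ))
--     rows = [[r.get(h, "") for h in headers] for r in records_sorted]
--     return headers, rows
-- ===== Notes on version B (the rewrite author's own statement) =====
-- stated objective: simpler
-- what changed: The stateful priority loop becomes a comprehension plus a set difference, and the remove/re-sort/scan-for-insert-position/double-insert block for placing type before subtype is replaced by a single sorted() call with a composite key that maps subtype to ('type', 1).
import Mathlib
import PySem

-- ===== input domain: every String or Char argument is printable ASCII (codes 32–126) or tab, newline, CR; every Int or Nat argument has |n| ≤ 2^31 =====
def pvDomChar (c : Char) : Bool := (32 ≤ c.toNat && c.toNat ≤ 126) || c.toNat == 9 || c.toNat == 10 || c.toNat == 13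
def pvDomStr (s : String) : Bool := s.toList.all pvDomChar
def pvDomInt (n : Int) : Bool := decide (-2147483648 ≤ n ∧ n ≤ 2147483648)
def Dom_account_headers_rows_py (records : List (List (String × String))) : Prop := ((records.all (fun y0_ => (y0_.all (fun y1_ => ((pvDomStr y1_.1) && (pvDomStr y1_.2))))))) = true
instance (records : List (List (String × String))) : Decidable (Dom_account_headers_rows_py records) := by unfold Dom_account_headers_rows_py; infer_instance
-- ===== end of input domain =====

-- B replaces A's remove/re-sort/scan/double-insert block for the type/subtype ordering by one
-- composite-key sorted() call (simpler decomposition, same values on every input).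

-- shared helpers: these correspond to Python fragments that are IDENTICAL in Source A and Source B
def pvPriority : List String :=
  ["id", "TypeDisplay", "AccountType", "displayName", "InstitutionName", "currentBalance", "displayBalance"]

-- {k for r in records for k in r.keys()}
def pvAllKeys (records : List (List (String × String))) : PySem.Set String :=
  PySem.Set.ofList (records.flatMap (fun r => PySem.Dict.keys ⟨r⟩))

-- key=lambda x: (x.get('TypeDisplay',''), x.get('AccountType',''), x.get('displayName',''))
def pvRecKey (r : List (String × String)) : String × String × String :=
  (PySem.Dict.getD ⟨r⟩ "TypeDisplay" "", PySem.Dict.getD ⟨r⟩ "AccountType" "", PySem.Dict.getD ⟨r⟩ "displayName" "")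

-- Python's lexicographic '<' on the 3-tuple of strings (pattern of PySem.List.sorted2's comparator)
def pvLt3 (a b : String × String × String) : Bool :=
  decide (a.1 < b.1) || (!decide (b.1 < a.1) &&
    (decide (a.2.1 < b.2.1) || (!decide (b.2.1 < a.2.1) && decide (a.2.2 < b.2.2))))

-- sorted(records, key=…): exact via PySem.List.sorted_eq_foldl_insertBy (stable sort = insertBy fold)
def pvSortRecords (records : List (List (String × String))) : List (List (String × String)) :=
  records.foldl (fun acc r => PySem.List.insertBy (fun a b => pvLt3 (pvRecKey a) (pvRecKey b)) r acc) []

-- ===== PORT A =====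
def account_headers_rows_py (records : List (List (String × String))) : List String × List (List String) :=
  if records = [] then ([], [])
  else
    let allKeys : PySem.Set String := pvAllKeys records
    let st := pvPriority.foldl
      (fun (st : List String × PySem.Set String) col =>
        if PySem.Set.contains st.2 col then (st.1 ++ [col], PySem.Set.discard st.2 col) else st)
      ([], allKeys)
    let remaining := PySem.List.sorted st.2 (fun k => k)
    let headers :=
      if remaining.contains "type" && remaining.contains "subtype" then
        -- list.remove: membership is guaranteed by the guard, so `(remove? …).getD` is exact here
        let rk1 := (PySem.List.remove? remaining "type").getD remaining
        let rk2 := (PySem.List.remove? rk1 "subtype").getD rk1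
        let other := PySem.List.sorted rk2 (fun k => k)
        -- for…else scan with break: first index with key > "type", else len(other_keys)
        let insertPos : Nat :=
          match other.findIdx? (fun key => decide ("type" < key)) with
          | some i => i
          | none => other.length
        st.1 ++ PySem.List.insert (PySem.List.insert other (insertPos : Int) "type")
          ((insertPos : Int) + 1) "subtype"
      else st.1 ++ remaining
    let recordsSorted := pvSortRecords records
    (headers, recordsSorted.map (fun r => headers.map (fun h => PySem.Dict.getD ⟨r⟩ h "")))

-- ===== PORT B =====
def account_headers_rows_py_alt (records : List (List (String × String))) : List String × List (List String) :=
  let allKeys := pvAllKeys records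
  let headers0 := pvPriority.filter (fun c => PySem.Set.contains allKeys c)
  let rest := PySem.Set.diff allKeys (PySem.Set.ofList pvPriority)
  let headers := headers0 ++
    (if PySem.Set.contains rest "type" && PySem.Set.contains rest "subtype" then
      PySem.List.sorted2 rest (fun k => if k == "subtype" then "type" else k)
        (fun k => if k == "subtype" then (1 : Int) else 0)
    else
      PySem.List.sorted rest (fun k => k))
  let recordsSorted := pvSortRecords records
  (headers, recordsSorted.map (fun r => headers.map (fun h => PySem.Dict.getD ⟨r⟩ h "")))

-- ===== PRECONDITION & SPEC =====
def Spec_account_headers_rows_py (records : List (List (String × String))) (out : List String × List (List String)) : Prop := out = account_headers_rows_py_alt records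
instance (records : List (List (String × String))) (out : List String × List (List String)) : Decidable (Spec_account_headers_rows_py records out) := by unfold Spec_account_headers_rows_py; infer_instance

-- ===== CLAIM (what is proved, stated in full; the proofs are below) =====
def Claim_equal_account_headers_rows_py : Prop := ∀ (records : List (List (String × String))), Dom_account_headers_rows_py records → Spec_account_headers_rows_py records (account_headers_rows_py records)

-- ===== LEMMAS AND PROOFS =====

theorem pv_discard_contains (s : List String) (c d : String) (h : d ≠ c) :
    (PySem.Set.discard s c).contains d = s.contains d := by
  simp [PySem.Set.discard, List.contains_eq_mem, List.mem_filter, h]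

theorem pv_prio_loop (P : List String) (hP : P.Nodup) (s hs : List String) :
    P.foldl
      (fun (st : List String × PySem.Set String) col =>
        if PySem.Set.contains st.2 col then (st.1 ++ [col], PySem.Set.discard st.2 col) else st)
      (hs, s)
    = (hs ++ P.filter (fun c => PySem.Set.contains s c), s.filter (fun x => !P.contains x)) := by
  induction P generalizing s hs with
  | nil => simp
  | cons c P ih =>
    have hc : c ∉ P := (List.nodup_cons.mp hP).1
    have hP' : P.Nodup := (List.nodup_cons.mp hP).2
    rw [List.foldl_cons]
    by_cases h : PySem.Set.contains s c
    · simp only [h, if_pos]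
      rw [ih hP' (PySem.Set.discard s c) (hs ++ [c])]
      refine Prod.ext ?_ ?_
      · show hs ++ [c] ++ _ = hs ++ _
        rw [List.filter_cons_of_pos (by simpa [PySem.Set.contains] using h)]
        have h1 : List.filter (fun c_1 => PySem.Set.contains (PySem.Set.discard s c) c_1) P
            = List.filter (fun c_1 => PySem.Set.contains s c_1) P :=
          List.filter_congr (fun d hd => pv_discard_contains s c d (fun hdc => hc (hdc ▸ hd)))
        rw [h1]
        simp
      · show List.filter _ (PySem.Set.discard s c) = _
        simp only [PySem.Set.discard, List.filter_filter]
        refine List.filter_congr ?_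
        intro x _
        rcases eq_or_ne x c with rfl | hxc
        · simp
        · simp [hxc]
    · simp only [h, Bool.false_eq_true, if_false]
      rw [ih hP' s hs]
      refine Prod.ext ?_ ?_
      · show hs ++ _ = hs ++ _
        rw [List.filter_cons_of_neg (by simpa [PySem.Set.contains] using h)]
      · show List.filter _ s = _
        refine List.filter_congr ?_
        intro x hx
        have hxc : x ≠ c := by
          intro hxc
          subst hxc
          simp [PySem.Set.contains, List.contains_eq_mem, hx] at h
        simp [hxc]

theorem pv_idxOf?_of_mem (l : List String) (v : String) (h : v ∈ l) :
    l.idxOf? v = some (l.idxOf v) := by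
  induction l with
  | nil => simp at h
  | cons a l ih =>
    by_cases hv : a = v
    · subst hv; simp [List.idxOf?_cons]
    · rcases List.mem_cons.mp h with rfl | h'
      · exact absurd rfl hv
      · simp [List.idxOf?_cons, hv, ih h']

theorem pv_remove_getD (l : List String) (v : String) (h : v ∈ l) :
    (PySem.List.remove? l v).getD l = l.erase v := by
  simp only [PySem.List.remove?, pv_idxOf?_of_mem l v h, Option.map_some, Option.getD_some]
  exact List.eraseIdx_idxOf_eq_erase v l

theorem pv_sorted_strict (R : List String) (h : R.Nodup) :
    List.Pairwise (· < ·) (PySem.List.sorted R (fun k => k)) := by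
  have hle := PySem.List.sorted_pairwise R (fun k => k)
  have hnd : (PySem.List.sorted R (fun k => k)).Nodup :=
    (PySem.List.sorted_perm R (fun k => k) false).nodup_iff.mpr h
  exact (hle.and hnd).imp (fun h => lt_of_le_of_ne h.1 h.2)

theorem pv_pos_eq (t : String) (L : List String) (hL : List.Pairwise (· < ·) L) (ht : t ∉ L) :
    (match L.findIdx? (fun k => decide (t < k)) with
      | some i => i
      | none => L.length)
    = (L.takeWhile (fun x => decide (x < t))).length := by
  induction L with
  | nil => simp
  | cons a L ih =>
    rcases List.pairwise_cons.mp hL with ⟨_, hL'⟩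
    have hat : a ≠ t := fun h => ht (h ▸ List.mem_cons_self)
    by_cases h : t < a
    · have d1 : decide (t < a) = true := decide_eq_true h
      have d2 : decide (a < t) = false := decide_eq_false (lt_asymm h)
      simp only [List.findIdx?_cons, List.takeWhile_cons, d1, d2]
      simp
    · have h2 : a < t := lt_of_le_of_ne (le_of_not_gt h) hat
      have d1 : decide (t < a) = false := decide_eq_false h
      have d2 : decide (a < t) = true := decide_eq_true h2
      have hih := ih hL' (fun hm => ht (List.mem_cons_of_mem a hm))
      simp only [List.findIdx?_cons, List.takeWhile_cons, d1, d2, Bool.false_eq_true, if_false,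
        if_true, List.length_cons]
      rcases hfi : L.findIdx? (fun k => decide (t < k)) with _ | i
      · simp only [hfi] at hih
        simp only [Option.map_none]
        exact congrArg (fun n => n + 1) hih
      · simp only [hfi] at hih
        simp only [Option.map_some]
        exact congrArg (fun n => n + 1) hih

theorem pv_insert_nat {α : Type} (l : List α) (p : Nat) (hp : p ≤ l.length) (v : α) :
    PySem.List.insert l (p : Int) v = l.take p ++ v :: l.drop p := by
  have h1 : ¬ ((1:Int) < 0) := by norm_num
  have h2 : ¬ ((p:Int) < 0) := by omega
  simp only [PySem.List.insert, PySem.List.sliceIndices, h1, if_false, h2]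
  have h3 : (min (p : Int) (l.length : Int)).toNat = p := by omega
  rw [h3]

theorem pv_dropWhile_gt (t : String) (L : List String) (hL : List.Pairwise (· < ·) L) (ht : t ∉ L) :
    ∀ x ∈ L.dropWhile (fun x => decide (x < t)), t < x := by
  induction L with
  | nil => simp
  | cons a L ih =>
    rcases List.pairwise_cons.mp hL with ⟨ha, hL'⟩
    have hat : a ≠ t := fun h => ht (h ▸ List.mem_cons_self)
    by_cases h : a < t
    · rw [List.dropWhile_cons_of_pos (by simpa using h)]
      exact ih hL' (fun hm => ht (List.mem_cons_of_mem a hm))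
    · have h2 : t < a := lt_of_le_of_ne (le_of_not_gt h) (Ne.symm hat)
      rw [List.dropWhile_cons_of_neg (by simpa using h)]
      intro x hx
      rcases List.mem_cons.mp hx with rfl | hx'
      · exact h2
      · exact lt_trans h2 (ha x hx')

theorem pv_sorted2_eq_sorted_lex {α : Type} (xs : List α) (k1 : α → String) (k2 : α → Int) :
    PySem.List.sorted2 xs k1 k2
    = PySem.List.sorted xs (fun x => toLex (k1 x, k2 x)) := by
  simp only [PySem.List.sorted2, PySem.List.sorted]
  congr 1
  funext acc x
  congr 1
  funext a b
  rcases lt_trichotomy (k1 a) (k1 b) with h | h | h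
  · simp [Prod.Lex.lt_iff, h, lt_asymm h]
  · simp [Prod.Lex.lt_iff, h]
  · simp [Prod.Lex.lt_iff, h, lt_asymm h, ne_of_gt h]

theorem pv_branch (R : List String) (hnd : R.Nodup) (ht : "type" ∈ R) (hs : "subtype" ∈ R) :
    (let remaining := PySem.List.sorted R (fun k => k)
     let rk1 := (PySem.List.remove? remaining "type").getD remaining
     let rk2 := (PySem.List.remove? rk1 "subtype").getD rk1
     let other := PySem.List.sorted rk2 (fun k => k)
     let insertPos : Nat :=
       match other.findIdx? (fun key => decide ("type" < key)) with
       | some i => i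
       | none => other.length
     PySem.List.insert (PySem.List.insert other (insertPos : Int) "type")
       ((insertPos : Int) + 1) "subtype")
    = PySem.List.sorted2 R (fun k => if k == "subtype" then "type" else k)
        (fun k => if k == "subtype" then (1 : Int) else 0) := by
  have hperm : (PySem.List.sorted R (fun k => k)).Perm R := PySem.List.sorted_perm R _ false
  have hnd_rk : (PySem.List.sorted R (fun k => k)).Nodup := hperm.nodup_iff.mpr hnd
  have hstrict_rk : List.Pairwise (· < ·) (PySem.List.sorted R (fun k => k)) := pv_sorted_strict R hnd
  have ht_rk : "type" ∈ PySem.List.sorted R (fun k => k) := hperm.mem_iff.mpr ht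
  have hs_rk : "subtype" ∈ PySem.List.sorted R (fun k => k) := hperm.mem_iff.mpr hs
  have e1 : (PySem.List.remove? (PySem.List.sorted R (fun k => k)) "type").getD
      (PySem.List.sorted R (fun k => k)) = (PySem.List.sorted R (fun k => k)).erase "type" :=
    pv_remove_getD _ _ ht_rk
  have hs_rk1 : "subtype" ∈ (PySem.List.sorted R (fun k => k)).erase "type" :=
    (List.mem_erase_of_ne (by decide)).mpr hs_rk
  have e2 : (PySem.List.remove? ((PySem.List.sorted R (fun k => k)).erase "type") "subtype").getD
      ((PySem.List.sorted R (fun k => k)).erase "type")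
      = ((PySem.List.sorted R (fun k => k)).erase "type").erase "subtype" :=
    pv_remove_getD _ _ hs_rk1
  simp only [e1, e2]
  set L := ((PySem.List.sorted R (fun k => k)).erase "type").erase "subtype" with hLdef
  have hnd_rk1 : ((PySem.List.sorted R (fun k => k)).erase "type").Nodup := hnd_rk.erase _
  have hnd_L : L.Nodup := hnd_rk1.erase _
  have hsub1 : L.Sublist (PySem.List.sorted R (fun k => k)) :=
    (List.erase_sublist).trans (List.erase_sublist)
  have hstrict_L : List.Pairwise (· < ·) L := hstrict_rk.sublist hsub1
  have ht_L : "type" ∉ L := fun hm =>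
    (hnd_rk.not_mem_erase) (List.Sublist.mem hm (List.erase_sublist))
  have hs_L : "subtype" ∉ L := hnd_rk1.not_mem_erase
  rw [PySem.List.sorted_eq_of_perm_of_pairwise_lt L L (fun k => k) (List.Perm.refl L) hstrict_L]
  rw [pv_pos_eq "type" L hstrict_L ht_L]
  set tw := L.takeWhile (fun x => decide (x < "type")) with htwdef
  set dw := L.dropWhile (fun x => decide (x < "type")) with hdwdef
  have htwdw : tw ++ dw = L := List.takeWhile_append_dropWhile
  have htw_le : tw.length ≤ L.length := (List.takeWhile_sublist _).length_le
  rw [pv_insert_nat L tw.length htw_le "type"]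
  have htake : L.take tw.length = tw := by
    conv_lhs => rw [← htwdw]
    rw [List.take_append]
    simp
  have hdrop : L.drop tw.length = dw := by
    conv_lhs => rw [← htwdw]
    rw [List.drop_left]
  rw [htake, hdrop]
  have hcast : ((tw.length : Int) + 1) = ((tw.length + 1 : Nat) : Int) := by push_cast; ring
  rw [hcast, pv_insert_nat (tw ++ "type" :: dw) (tw.length + 1) (by simp) "subtype"]
  have htake2 : (tw ++ "type" :: dw).take (tw.length + 1) = tw ++ ["type"] := by
    rw [List.take_append]
    simp
  have hdrop2 : (tw ++ "type" :: dw).drop (tw.length + 1) = dw := by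
    rw [List.drop_append]
    simp
  rw [htake2, hdrop2]
  rw [pv_sorted2_eq_sorted_lex R _ _]
  -- goal: tw ++ ["type"] ++ "subtype" :: dw = sorted R keyfn
  refine (PySem.List.sorted_eq_of_perm_of_pairwise_lt R (tw ++ ["type"] ++ "subtype" :: dw) _ ?_ ?_).symm
  · -- permutation
    have step0 : tw ++ ["type"] ++ "subtype" :: dw = tw ++ "type" :: "subtype" :: dw := by simp
    have p1a : (tw ++ "type" :: ("subtype" :: dw)).Perm ("type" :: (tw ++ "subtype" :: dw)) :=
      List.perm_middle
    have p1b : (tw ++ "subtype" :: dw).Perm ("subtype" :: (tw ++ dw)) := List.perm_middle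
    have p1 : (tw ++ ["type"] ++ "subtype" :: dw).Perm ("type" :: "subtype" :: (tw ++ dw)) := by
      rw [step0]
      exact p1a.trans (List.Perm.cons _ p1b)
    have p2 : ("type" :: "subtype" :: (tw ++ dw)).Perm R := by
      rw [htwdw]
      have q1 : ("subtype" :: L).Perm ((PySem.List.sorted R (fun k => k)).erase "type") :=
        (List.perm_cons_erase hs_rk1).symm
      have q2 : ("type" :: ((PySem.List.sorted R (fun k => k)).erase "type")).Perm
          (PySem.List.sorted R (fun k => k)) := (List.perm_cons_erase ht_rk).symm
      exact ((q1.cons "type").trans q2).trans hperm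
    exact p1.trans p2
  · -- pairwise strict on composite key
    have memtw : ∀ x ∈ tw, x < "type" ∧ x ≠ "subtype" := by
      intro x hx
      refine ⟨by simpa using List.mem_takeWhile_imp hx, ?_⟩
      intro hxe
      exact hs_L (hxe ▸ List.Sublist.mem hx (List.takeWhile_sublist _))
    have memdw : ∀ x ∈ dw, "type" < x ∧ x ≠ "subtype" := by
      intro x hx
      refine ⟨pv_dropWhile_gt "type" L hstrict_L ht_L x hx, ?_⟩
      intro hxe
      exact hs_L (hxe ▸ List.Sublist.mem hx (List.dropWhile_sublist _))
    have klt : ∀ a b : String, a ≠ "subtype" → b ≠ "subtype" → a < b →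
        toLex ((if a == "subtype" then "type" else a), (if a == "subtype" then (1:Int) else 0)) <
        toLex ((if b == "subtype" then "type" else b), (if b == "subtype" then (1:Int) else 0)) := by
      intro a b ha hb hab
      simp only [beq_iff_eq, ha, hb, if_false]
      exact Prod.Lex.lt_iff.mpr (Or.inl hab)
    have klt_a_s : ∀ a : String, a ≠ "subtype" → a < "type" →
        toLex ((if a == "subtype" then "type" else a), (if a == "subtype" then (1:Int) else 0)) <
        toLex ((if ("subtype":String) == "subtype" then "type" else "subtype"),
          (if ("subtype":String) == "subtype" then (1:Int) else 0)) := by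
      intro a ha hat
      simp only [beq_iff_eq, ha, if_false, if_true]
      exact Prod.Lex.lt_iff.mpr (Or.inl hat)
    have klt_s_b : ∀ b : String, b ≠ "subtype" → "type" < b →
        toLex ((if ("subtype":String) == "subtype" then "type" else "subtype"),
          (if ("subtype":String) == "subtype" then (1:Int) else 0)) <
        toLex ((if b == "subtype" then "type" else b), (if b == "subtype" then (1:Int) else 0)) := by
      intro b hb htb
      simp only [beq_iff_eq, hb, if_false, if_true]
      exact Prod.Lex.lt_iff.mpr (Or.inl htb)
    have klt_t_s :
        toLex ((if ("type":String) == "subtype" then "type" else "type"),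
          (if ("type":String) == "subtype" then (1:Int) else 0)) <
        toLex ((if ("subtype":String) == "subtype" then "type" else "subtype"),
          (if ("subtype":String) == "subtype" then (1:Int) else 0)) := by
      simp only [beq_iff_eq, if_true, if_neg (by decide : ¬ ("type":String) = "subtype")]
      exact Prod.Lex.lt_iff.mpr (Or.inr ⟨rfl, by norm_num⟩)
    have ptw : List.Pairwise (· < ·) tw := hstrict_L.sublist (List.takeWhile_sublist _)
    have pdw : List.Pairwise (· < ·) dw := hstrict_L.sublist (List.dropWhile_sublist _)
    refine List.pairwise_append.mpr ⟨List.pairwise_append.mpr ⟨?_, ?_, ?_⟩, ?_, ?_⟩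
    · exact ptw.imp_of_mem (fun {a b} hma hmb hab =>
        klt a b (memtw a hma).2 (memtw b hmb).2 hab)
    · simp
    · intro a hma b hmb
      rcases List.mem_singleton.mp hmb with rfl
      exact klt a "type" (memtw a hma).2 (by decide) (memtw a hma).1
    · refine List.pairwise_cons.mpr ⟨?_, ?_⟩
      · intro b hb
        exact klt_s_b b (memdw b hb).2 (memdw b hb).1
      · exact pdw.imp_of_mem (fun {a b} hma hmb hab =>
          klt a b (memdw a hma).2 (memdw b hmb).2 hab)
    · intro a hma b hmb
      rcases List.mem_append.mp hma with hma | hma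
      · rcases List.mem_cons.mp hmb with rfl | hmb
        · exact klt_a_s a (memtw a hma).2 (memtw a hma).1
        · exact klt a b (memtw a hma).2 (memdw b hmb).2
            (lt_trans (memtw a hma).1 (memdw b hmb).1)
      · rcases List.mem_singleton.mp hma with rfl
        rcases List.mem_cons.mp hmb with rfl | hmb
        · exact klt_t_s
        · exact klt "type" b (by decide) (memdw b hmb).2 (memdw b hmb).1

theorem pv_headers_eq (K : List String) (hK : K.Nodup) :
    (let st := pvPriority.foldl
        (fun (st : List String × PySem.Set String) col =>
          if PySem.Set.contains st.2 col then (st.1 ++ [col], PySem.Set.discard st.2 col) else st)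
        ([], K)
     let remaining := PySem.List.sorted st.2 (fun k => k)
     if remaining.contains "type" && remaining.contains "subtype" then
       let rk1 := (PySem.List.remove? remaining "type").getD remaining
       let rk2 := (PySem.List.remove? rk1 "subtype").getD rk1
       let other := PySem.List.sorted rk2 (fun k => k)
       let insertPos : Nat :=
         match other.findIdx? (fun key => decide ("type" < key)) with
         | some i => i
         | none => other.length
       st.1 ++ PySem.List.insert (PySem.List.insert other (insertPos : Int) "type")
         ((insertPos : Int) + 1) "subtype"
     else st.1 ++ remaining)
    = pvPriority.filter (fun c => PySem.Set.contains K c) ++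
      (if PySem.Set.contains (PySem.Set.diff K (PySem.Set.ofList pvPriority)) "type" &&
          PySem.Set.contains (PySem.Set.diff K (PySem.Set.ofList pvPriority)) "subtype" then
        PySem.List.sorted2 (PySem.Set.diff K (PySem.Set.ofList pvPriority))
          (fun k => if k == "subtype" then "type" else k)
          (fun k => if k == "subtype" then (1 : Int) else 0)
      else PySem.List.sorted (PySem.Set.diff K (PySem.Set.ofList pvPriority)) (fun k => k)) := by
  have hP : pvPriority.Nodup := by decide
  have hdiff : PySem.Set.diff K (PySem.Set.ofList pvPriority)
      = K.filter (fun x => !pvPriority.contains x) := by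
    simp only [PySem.Set.diff]
    refine List.filter_congr ?_
    intro x _
    simp [PySem.Set.contains, List.contains_eq_mem, PySem.Set.mem_ofList]
  rw [pv_prio_loop pvPriority hP K []]
  rw [hdiff]
  simp only [List.nil_append]
  set R := K.filter (fun x => !pvPriority.contains x) with hR
  have hndR : R.Nodup := hK.filter _
  have hguard : ∀ v : String, (PySem.List.sorted R (fun k => k)).contains v = R.contains v := by
    intro v
    simp [List.contains_eq_mem, (PySem.List.sorted_perm R (fun k => k) false).mem_iff]
  have hsetc : ∀ v : String, PySem.Set.contains R v = R.contains v := fun _ => rfl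
  simp only [hguard, hsetc]
  by_cases hg : (R.contains "type" && R.contains "subtype") = true
  · rw [if_pos hg, if_pos hg]
    have ht : "type" ∈ R := by
      have := (Bool.and_eq_true _ _).mp hg
      simpa [List.contains_eq_mem] using this.1
    have hsb : "subtype" ∈ R := by
      have := (Bool.and_eq_true _ _).mp hg
      simpa [List.contains_eq_mem] using this.2
    exact congrArg (List.filter (fun c => PySem.Set.contains K c) pvPriority ++ ·)
      (pv_branch R hndR ht hsb)
  · rw [if_neg hg, if_neg hg]

-- ===== VERDICT (by name: the statement is the Claim_ definition above) =====
theorem account_headers_rows_py_spec : Claim_equal_account_headers_rows_py := by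
  intro records _
  unfold Spec_account_headers_rows_py account_headers_rows_py account_headers_rows_py_alt
  by_cases hrec : records = []
  · subst hrec; decide
  · rw [if_neg hrec]
    have hH := pv_headers_eq (pvAllKeys records) (PySem.Set.nodup_ofList _)
    exact congrArg (fun H : List String =>
      (H, (pvSortRecords records).map (fun r => H.map (fun h => PySem.Dict.getD ⟨r⟩ h ""))))
      hH
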